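-- pv_equiv track=rewrite | github.com/nicebin23/codetree-TILs | 240928/아름다운 수열/beautiful-sequence.py | check_beautiful_sequences
-- ===== SOURCE A (Python) =====
-- def bSort(arr) :
--   n = len(arr)
--   for last in range(1, n) :
--     for i in range(last, 0, -1) :
--       if arr[i-1] > arr[i] :
--         arr[i-1], arr[i] = arr[i], arr[i-1]
--   return arr
--
-- def check_beautiful_sequences(A, B):
--     N = len(A)
--     M = len(B)
--     results = []
--     count = 0
--
--     B_sorted = bSort(B)
--
--     for i in range(N - M + 1):
--         window = A[i:i + M]
--         window_sorted = bSort(window)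
--         diff = [window_sorted[j] - B_sorted[j] for j in range(M)]
--         if len(set(diff)) == 1:
--             results.append(i + 1)
--             count += 1
--     return count, results
-- ===== SOURCE B (Python) =====
-- def check_beautiful_sequences(A, B):
--     # Sorts B in place (A's bSort(B) also mutates B); return-value equivalent to A.
--     B.sort()
--     N = len(A)
--     M = len(B)
--     count = 0
--     results = []
--     if M == 0:
--         return count, results
--     base = {}
--     for b in B:
--         base[b] = base.get(b, 0) + 1
--     b0 = B[0]
--     for i in range(N - M + 1):
--         window = A[i:i + M]
--         d = min(window) - b0
--         c = dict(base)
--         ok = True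
--         for x in window:
--             k = x - d
--             if c.get(k, 0) == 0:
--                 ok = False
--                 break
--             c[k] -= 1
--         if ok:
--             results.append(i + 1)
--             count += 1
--     return count, results
-- ===== Notes on version B (the rewrite author's own statement) =====
-- stated objective: faster
-- what changed: Per window, A bubble-sorts the window (O(M^2)), builds the elementwise difference list against sorted B and tests len(set(diff))==1; B sorts B once with list.sort, precomputes a count dict of B, and for each window checks multiset equality of the offset-shifted window against that dict in one O(M) pass with early exit, sorting nothing per window.
import Mathlib
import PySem

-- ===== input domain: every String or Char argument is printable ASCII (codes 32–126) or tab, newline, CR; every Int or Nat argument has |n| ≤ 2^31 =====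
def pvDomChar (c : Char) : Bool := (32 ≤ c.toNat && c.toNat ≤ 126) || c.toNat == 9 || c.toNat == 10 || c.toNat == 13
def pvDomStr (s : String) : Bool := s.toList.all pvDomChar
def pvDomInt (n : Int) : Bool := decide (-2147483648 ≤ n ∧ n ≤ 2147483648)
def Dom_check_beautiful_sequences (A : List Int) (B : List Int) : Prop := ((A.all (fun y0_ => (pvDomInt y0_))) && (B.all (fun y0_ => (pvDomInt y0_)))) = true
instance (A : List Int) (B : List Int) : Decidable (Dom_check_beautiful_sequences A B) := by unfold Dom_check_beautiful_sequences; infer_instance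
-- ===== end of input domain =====

-- B replaces A's per-window bubble sort + diff-list + set-size test by a one-pass counting-dict
-- multiset check per window (objective: faster). Both Pythons sort the argument B in place;
-- the equivalence proved here is about the RETURN value (the mutation is identical in A and B).

-- ===== PORT A =====
-- one inner-loop step of bSort: compare arr[i-1], arr[i] and swap if out of order
def pvBswap (arr : List Int) (i : Int) : List Int :=
  if PySem.List.pyGetD arr (i - 1) 0 > PySem.List.pyGetD arr i 0 then
    PySem.List.pySetD (PySem.List.pySetD arr (i - 1) (PySem.List.pyGetD arr i 0)) i
      (PySem.List.pyGetD arr (i - 1) 0)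
  else arr

def pvBSort (arr : List Int) : List Int :=
  let n : Int := PySem.List.len arr
  (PySem.List.pyRange 1 n 1).foldl
    (fun a last => (PySem.List.pyRange last 0 (-1)).foldl pvBswap a) arr

def check_beautiful_sequences (A : List Int) (B : List Int) : Int × List Int :=
  let N : Int := PySem.List.len A
  let M : Int := PySem.List.len B
  let Bs := pvBSort B
  (PySem.List.pyRange 0 (N - M + 1) 1).foldl
    (fun st i =>
      let window := PySem.List.slice A (some i) (some (i + M))
      let ws := pvBSort window
      let diff := (PySem.List.pyRange 0 M 1).map
        (fun j => PySem.List.pyGetD ws j 0 - PySem.List.pyGetD Bs j 0)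
      if PySem.Set.len (PySem.Set.ofList diff) = 1 then (st.1 + 1, st.2 ++ [i + 1]) else st)
    (0, [])

-- ===== PORT B =====
-- the inner 'for x in window: … break' loop of Source B (c.get(k,0)==0 → ok=False and break)
def pvScan (c : PySem.Dict Int Int) (d : Int) : List Int → Bool
  | [] => true
  | x :: rest =>
    let k := x - d
    if c.getD k 0 = 0 then false else pvScan (c.insert k (c.getD k 0 - 1)) d rest

def check_beautiful_sequences_alt (A : List Int) (B : List Int) : Int × List Int :=
  let Bs := PySem.List.sorted B (fun x => x) false
  let N : Int := PySem.List.len A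
  let M : Int := PySem.List.len Bs
  if M = 0 then (0, [])
  else
    let base := Bs.foldl (fun d b => d.insert b (d.getD b 0 + 1)) PySem.Dict.empty
    let b0 := PySem.List.pyGetD Bs 0 0   -- B[0]; in range since M ≠ 0
    (PySem.List.pyRange 0 (N - M + 1) 1).foldl
      (fun st i =>
        let window := PySem.List.slice A (some i) (some (i + M))
        let d := ((PySem.List.min? window (fun x => x)).getD 0) - b0   -- min(window); window ≠ [] here
        if pvScan base d window then (st.1 + 1, st.2 ++ [i + 1]) else st)
      (0, [])

-- ===== PRECONDITION & SPEC =====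
def Spec_check_beautiful_sequences (A : List Int) (B : List Int) (out : Int × List Int) : Prop := out = check_beautiful_sequences_alt A B
instance (A : List Int) (B : List Int) (out : Int × List Int) : Decidable (Spec_check_beautiful_sequences A B out) := by unfold Spec_check_beautiful_sequences; infer_instance

-- ===== CLAIM (what is proved, stated in full; the proofs are below) =====
def Claim_equal_check_beautiful_sequences : Prop := ∀ (A : List Int) (B : List Int), Dom_check_beautiful_sequences A B → Spec_check_beautiful_sequences A B (check_beautiful_sequences A B)

-- ===== LEMMAS AND PROOFS =====

lemma pvBswap_surgery (p : List Int) (a b : Int) (r : List Int) :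
    pvBswap (p ++ a :: b :: r) ((p.length : Int) + 1)
      = p ++ (if a > b then b :: a :: r else a :: b :: r) := by
  have h1 : ((p.length : Int) + 1) - 1 = ((p.length : Nat) : Int) := by ring
  have h2 : ((p.length : Int) + 1) = (((p.length + 1 : Nat)) : Int) := by push_cast; ring
  have ga : (p ++ a :: b :: r).getD p.length 0 = a := by
    rw [List.getD_append_right p _ 0 p.length le_rfl]; simp
  have gb : (p ++ a :: b :: r).getD (p.length + 1) 0 = b := by
    rw [List.getD_append_right p _ 0 _ (by omega)]; simp
  unfold pvBswap
  rw [h1, h2]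
  simp only [PySem.List.pyGetD_natCast, PySem.List.pySetD_natCast, ga, gb]
  split_ifs with h
  · rw [List.set_append_right p.length b le_rfl]
    simp only [Nat.sub_self, List.set]
    rw [List.set_append_right (p.length + 1) a (by omega)]
    simp
  · rfl

lemma pvInner_noop (m : Nat) (l : List Int) (hm : m < l.length)
    (hs : (l.take (m + 1)).Pairwise (· ≤ ·)) :
    (PySem.List.pyRange (m : Int) 0 (-1)).foldl pvBswap l = l := by
  induction m with
  | zero => norm_num
  | succ m ih =>
    have hcast : ((m + 1 : Nat) : Int) = (m : Int) + 1 := by push_cast; ring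
    rw [hcast, PySem.List.pyRange_neg_one_cons (by positivity)]
    simp only [List.foldl_cons]
    have hle : l[m]'(by omega) ≤ l[m + 1]'(by omega) := by
      rw [List.pairwise_iff_getElem] at hs
      have := hs m (m + 1) (by simp; omega) (by simp; omega) (by omega)
      simpa using this
    have hnoswap : pvBswap l ((m : Int) + 1) = l := by
      unfold pvBswap
      have h1 : ((m : Int) + 1) - 1 = ((m : Nat) : Int) := by ring
      rw [h1, hcast.symm]
      simp only [PySem.List.pyGetD_natCast]
      rw [List.getD_eq_getElem l 0 (by omega), List.getD_eq_getElem l 0 (by omega)]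
      rw [if_neg (by omega)]
    rw [hnoswap]
    have : (m : Int) + 1 - 1 = (m : Int) := by ring
    rw [this]
    exact ih (by omega) (List.Pairwise.sublist (by
      have : l.take (m + 1) = (l.take (m + 1 + 1)).take (m + 1) := by
        rw [List.take_take]; simp
      rw [this]; exact List.take_sublist _ _) hs)

lemma pvInner_sift : ∀ (p : List Int) (x : Int) (r : List Int), p.Pairwise (· ≤ ·) →
    ∃ s : List Int,
      (PySem.List.pyRange (p.length : Int) 0 (-1)).foldl pvBswap (p ++ x :: r) = s ++ r ∧
      s.Perm (p ++ [x]) ∧ s.Pairwise (· ≤ ·) := by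
  intro p
  induction p using List.reverseRecOn with
  | nil =>
    intro x r _
    exact ⟨[x], by norm_num, List.Perm.refl _, List.pairwise_singleton _ _⟩
  | append_singleton q y ih =>
    intro x r hp
    have hq : q.Pairwise (· ≤ ·) := (List.pairwise_append.mp hp).1
    have hqy : ∀ a ∈ q, a ≤ y := by
      intro a ha
      exact (List.pairwise_append.mp hp).2.2 a ha y (by simp)
    have hcast : (((q ++ [y]).length : Nat) : Int) = (q.length : Int) + 1 := by
      simp
    rw [hcast, PySem.List.pyRange_neg_one_cons (by positivity)]
    simp only [List.foldl_cons]
    have hassoc : (q ++ [y]) ++ x :: r = q ++ y :: x :: r := by simp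
    rw [hassoc, pvBswap_surgery q y x r]
    have hsub : (q.length : Int) + 1 - 1 = ((q.length : Nat) : Int) := by ring
    rw [hsub]
    by_cases hyx : y > x
    · rw [if_pos hyx]
      obtain ⟨s', h1, h2, h3⟩ := ih x (y :: r) hq
      refine ⟨s' ++ [y], by rw [h1]; simp, ?_, ?_⟩
      · refine List.Perm.trans (h2.append_right [y]) ?_
        have e1 : (q ++ [x]) ++ [y] = q ++ ([x] ++ [y]) := by simp
        have e2 : (q ++ [y]) ++ [x] = q ++ ([y] ++ [x]) := by simp
        rw [e1, e2]
        exact List.Perm.append_left q List.perm_append_comm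
      · rw [List.pairwise_append]
        refine ⟨h3, List.pairwise_singleton _ _, ?_⟩
        intro a ha b hb
        have hb' : b = y := by simpa using hb
        subst hb'
        have hmem : a ∈ q ++ [x] := h2.mem_iff.mp ha
        rcases List.mem_append.mp hmem with h | h
        · exact hqy a h
        · have : a = x := by simpa using h
          omega
    · rw [if_neg hyx]
      have hnoop := pvInner_noop q.length (q ++ y :: x :: r) (by simp) (by
        have htake : (q ++ y :: x :: r).take (q.length + 1) = q ++ [y] := by
          rw [List.take_append]
          simp
        rw [htake]; exact hp)
      rw [hnoop]
      refine ⟨q ++ [y, x], by simp, by simp, ?_⟩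
      rw [List.pairwise_append]
      refine ⟨hq, ?_, ?_⟩
      · have : y ≤ x := by omega
        simp [this]
      · intro a ha b hb
        have hb' : b = y ∨ b = x := by simpa using hb
        rcases hb' with hb' | hb' <;> subst hb'
        · exact hqy a ha
        · exact le_trans (hqy a ha) (by omega)

lemma pvOuter_inv (l : List Int) : ∀ (k : Nat), 1 ≤ k → k ≤ l.length →
    ∃ s : List Int,
      (PySem.List.pyRange 1 (k : Int) 1).foldl
        (fun a last => (PySem.List.pyRange last 0 (-1)).foldl pvBswap a) l
      = s ++ l.drop k ∧ s.Perm (l.take k) ∧ s.Pairwise (· ≤ ·) := by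
  intro k
  induction k with
  | zero => omega
  | succ k ih =>
    intro _ hk1
    by_cases hk : 1 ≤ k
    · obtain ⟨s, h1, h2, h3⟩ := ih hk (by omega)
      have hcast : ((k + 1 : Nat) : Int) = (k : Int) + 1 := by push_cast; ring
      rw [hcast, PySem.List.pyRange_one_succ_right (by exact_mod_cast hk), List.foldl_append]
      rw [h1]
      have hslen : s.length = k := by
        rw [h2.length_eq, List.length_take]; omega
      have hdrop : l.drop k = l[k]'(by omega) :: l.drop (k + 1) := by
        exact List.drop_eq_getElem_cons (by omega)
      rw [hdrop]
      obtain ⟨s', g1, g2, g3⟩ := pvInner_sift s (l[k]'(by omega)) (l.drop (k + 1)) h3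
      refine ⟨s', ?_, ?_, g3⟩
      · simp only [List.foldl_cons, List.foldl_nil]
        rw [show (k : Int) = ((s.length : Nat) : Int) by rw [hslen]]
        exact g1
      · refine g2.trans ?_
        have htake : l.take (k + 1) = l.take k ++ [l[k]'(by omega)] := by
          rw [List.take_add_one]
          simp [List.getElem?_eq_getElem (by omega : k < l.length)]
        rw [htake]
        exact h2.append_right _
    · have hk0 : k = 0 := by omega
      subst hk0
      refine ⟨l.take 1, ?_, List.Perm.refl _, ?_⟩
      · rw [show ((0 + 1 : Nat) : Int) = 1 by norm_num, PySem.List.pyRange_one_eq_nil le_rfl]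
        simp only [List.foldl_nil]
        exact (List.take_append_drop 1 l).symm
      · cases l with
        | nil => simp
        | cons a t => simp

lemma pvBSort_eq_sorted (l : List Int) :
    pvBSort l = PySem.List.sorted l (fun x => x) false := by
  rcases l with _ | ⟨a, t⟩
  · rfl
  · obtain ⟨s, h1, h2, h3⟩ := pvOuter_inv (a :: t) (a :: t).length (by simp) le_rfl
    have : pvBSort (a :: t) = s := by
      unfold pvBSort
      simp only [PySem.List.len_eq]
      rw [h1]
      simp
    rw [this]
    exact (PySem.List.sorted_id_eq_of_perm_of_pairwise _ s (by simpa using h2) h3).symm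

lemma pvSet_len_one_iff (xs : List Int) :
    PySem.Set.len (PySem.Set.ofList xs) = 1 ↔ ∃ a, xs ≠ [] ∧ ∀ y ∈ xs, y = a := by
  constructor
  · intro h
    have hlen : (PySem.Set.ofList xs).length = 1 := by
      simp [PySem.Set.len] at h
      exact_mod_cast h
    obtain ⟨a, ha⟩ := List.length_eq_one_iff.mp hlen
    refine ⟨a, ?_, ?_⟩
    · intro hnil; subst hnil; simp at ha
    · intro y hy
      have : y ∈ PySem.Set.ofList xs := (PySem.Set.mem_ofList _ _).mpr hy
      rw [ha] at this; simpa using this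
  · rintro ⟨a, hne, hall⟩
    have hmem : a ∈ PySem.Set.ofList xs := by
      rw [PySem.Set.mem_ofList]
      rcases xs with _ | ⟨x, t⟩
      · exact absurd rfl hne
      · have := hall x (by simp)
        subst this; simp
    have hnd := PySem.Set.nodup_ofList (xs := xs)
    have hall' : ∀ y ∈ PySem.Set.ofList xs, y = a := by
      intro y hy
      exact hall y ((PySem.Set.mem_ofList _ _).mp hy)
    rcases hofl : PySem.Set.ofList xs with _ | ⟨b, t⟩
    · rw [hofl] at hmem; simp at hmem
    · rw [hofl] at hnd hall'
      rcases t with _ | ⟨c, u⟩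
      · simp [PySem.Set.len]
      · have hb : b = a := hall' b (by simp)
        have hc : c = a := hall' c (by simp)
        rw [List.nodup_cons] at hnd
        exact absurd (by simp [hb, hc.symm] : b ∈ c :: u) hnd.1

lemma pvScan_iff : ∀ (ws : List Int) (S : List Int) (c : PySem.Dict Int Int) (d : Int),
    (∀ k, c.getD k 0 = (S.count k : Int)) →
    (pvScan c d ws = true ↔ ∀ k, ((ws.map (fun x => x - d)).count k : Int) ≤ (S.count k : Int)) := by
  intro ws
  induction ws with
  | nil =>
    intro S c d hc
    simp [pvScan]
  | cons x rest ih =>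
    intro S c d hc
    simp only [pvScan]
    set k0 := x - d with hk0
    by_cases hz : c.getD k0 0 = 0
    · rw [if_pos hz]
      simp only [Bool.false_eq_true, false_iff]
      intro hall
      have := hall k0
      have hcnt : 1 ≤ ((x :: rest).map (fun x => x - d)).count k0 := by
        simp [List.count_cons, hk0]
      rw [hc k0] at hz
      have : (S.count k0 : Int) = 0 := by exact_mod_cast hz
      omega
    · rw [if_neg hz]
      have hpos : 1 ≤ S.count k0 := by
        rw [hc k0] at hz
        by_contra h
        have : S.count k0 = 0 := by omega
        simp [this] at hz
      have hc' : ∀ k, (c.insert k0 (c.getD k0 0 - 1)).getD k 0 = ((S.erase k0).count k : Int) := by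
        intro k
        rw [PySem.Dict.getD_insert]
        by_cases hk : k = k0
        · subst hk
          rw [if_pos rfl, hc k0, List.count_erase_self]
          push_cast [Nat.cast_sub hpos]
          ring
        · rw [if_neg hk, hc k, List.count_erase_of_ne hk]
      rw [ih (S.erase k0) _ d hc']
      have hcc : ∀ k : Int, (((x :: rest).map (fun y => y - d)).count k : Int)
          = ((rest.map (fun y => y - d)).count k : Int) + (if k0 = k then 1 else 0) := by
        intro k
        by_cases h : k0 = k
        · simp [List.count_cons, hk0, h]
        · rw [if_neg h]
          have : ¬ (x - d = k) := by rw [← hk0]; exact h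
          simp [List.count_cons, this]
      have hec : ∀ k : Int, (((S.erase k0).count k : Int))
          = (S.count k : Int) - (if k = k0 then 1 else 0) := by
        intro k
        by_cases hk : k = k0
        · subst hk
          rw [List.count_erase_self, if_pos rfl]
          push_cast [Nat.cast_sub hpos]
          ring
        · rw [List.count_erase_of_ne hk, if_neg hk]
          ring
      constructor
      · intro hall k
        have h1 := hall k
        rw [hec k] at h1
        rw [hcc k]
        by_cases hk : k = k0
        · rw [if_pos hk] at h1
          rw [if_pos hk.symm]
          omega
        · rw [if_neg hk] at h1
          rw [if_neg (fun h => hk h.symm)]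
          omega
      · intro hall k
        have h1 := hall k
        rw [hcc k] at h1
        rw [hec k]
        by_cases hk : k = k0
        · rw [if_pos hk.symm] at h1
          rw [if_pos hk]
          omega
        · rw [if_neg (fun h => hk h.symm)] at h1
          rw [if_neg hk]
          omega

lemma pvCond_iff (w B : List Int) (hw : w.length = B.length) (hB : B ≠ []) :
    (PySem.Set.len (PySem.Set.ofList ((PySem.List.pyRange 0 (PySem.List.len B) 1).map
        (fun j => PySem.List.pyGetD (PySem.List.sorted w (fun x => x) false) j 0
                - PySem.List.pyGetD (PySem.List.sorted B (fun x => x) false) j 0))) = 1)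
    ↔ pvScan (PySem.Dict.counter (PySem.List.sorted B (fun x => x) false))
        (((PySem.List.min? w (fun x => x)).getD 0)
          - PySem.List.pyGetD (PySem.List.sorted B (fun x => x) false) 0 0) w = true := by
  set ws := PySem.List.sorted w (fun x => x) false with hws
  set Bs := PySem.List.sorted B (fun x => x) false with hBs
  set M := B.length with hM
  set d := ((PySem.List.min? w (fun x => x)).getD 0) - PySem.List.pyGetD Bs 0 0 with hd
  have hM1 : 1 ≤ M := by
    rcases B with _ | _
    · exact absurd rfl hB
    · simp [hM]
  have hlw : ws.length = M := by rw [hws, PySem.List.length_sorted, hw]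
  have hlB : Bs.length = M := by rw [hBs, PySem.List.length_sorted]
  have hwperm : ws.Perm w := PySem.List.sorted_perm w _ _
  have hBperm : Bs.Perm B := PySem.List.sorted_perm B _ _
  have hwsort : ws.Pairwise (· ≤ ·) := PySem.List.sorted_pairwise w (fun x => x)
  have hBsort : Bs.Pairwise (· ≤ ·) := PySem.List.sorted_pairwise B (fun x => x)
  -- the diff list in getD form
  have hdiff : (PySem.List.pyRange 0 (PySem.List.len B) 1).map
        (fun j => PySem.List.pyGetD ws j 0 - PySem.List.pyGetD Bs j 0)
      = (List.range M).map (fun k => ws.getD k 0 - Bs.getD k 0) := by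
    rw [PySem.List.len_eq, PySem.List.pyRange_one, List.map_map]
    simp [Function.comp_def, List.getD_eq_getElem?_getD]
    rw [← hM]
  -- min(window) is the head of the sorted window
  have hwne : w ≠ [] := by
    intro h; rw [h] at hw; simp at hw; omega
  have hmin : (PySem.List.min? w (fun x => x)).getD 0 = ws.getD 0 0 := by
    rcases hm : PySem.List.min? w (fun x => x) with _ | m
    · rw [PySem.List.min?_eq_none_iff] at hm
      exact absurd hm hwne
    · rcases hwsl : ws with _ | ⟨h0, t⟩
      · rw [hwsl] at hlw; simp at hlw; omega
      · have h1 : ∀ y ∈ w, h0 ≤ y := PySem.List.key_head_sorted_le w (fun x => x) (by rw [← hwsl, hws])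
        have h2 : ∀ y ∈ w, m ≤ y := PySem.List.min?_isMin hm
        have hm_mem : m ∈ w := PySem.List.min?_mem hm
        have hh_mem : h0 ∈ w := by
          rw [← PySem.List.mem_sorted w (fun x => x) false, ← hws, hwsl]; simp
        have : m = h0 := le_antisymm (h2 h0 hh_mem) (h1 m hm_mem)
        simp [this]
  rw [hdiff, pvSet_len_one_iff,
    pvScan_iff w Bs _ d (fun k => PySem.Dict.getD_counter Bs k)]
  constructor
  · rintro ⟨a, hne, hall⟩
    -- a is the common diff; show d = a and the shifted window is a permutation of Bs
    have h0 : ws.getD 0 0 - Bs.getD 0 0 = a := by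
      apply hall
      rw [List.mem_map]
      exact ⟨0, by simp; omega, rfl⟩
    have hda : d = a := by
      rw [hd, hmin]
      have : PySem.List.pyGetD Bs 0 0 = Bs.getD 0 0 := by
        rw [show (0 : Int) = ((0 : Nat) : Int) by norm_num, PySem.List.pyGetD_natCast]
      rw [this, h0]
    have hmapeq : ws.map (fun x => x - d) = Bs := by
      apply List.ext_getElem
      · simp [hlw, hlB]
      · intro k hk1 hk2
        simp only [List.getElem_map]
        have hka : ws.getD k 0 - Bs.getD k 0 = a := by
          apply hall
          rw [List.mem_map]
          refine ⟨k, by simp at hk1 ⊢; omega, rfl⟩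
        rw [List.getD_eq_getElem ws 0 (by simp at hk1; omega),
            List.getD_eq_getElem Bs 0 (by simp at hk1 ⊢; omega)] at hka
        omega
    have hperm : (w.map (fun x => x - d)).Perm Bs := by
      rw [← hmapeq]
      exact (hwperm.map _).symm
    intro k
    rw [hperm.count_eq k]
  · intro hcnt
    have hsub : (w.map (fun x => x - d)).Subperm Bs := by
      rw [List.subperm_ext_iff]
      intro x _
      exact_mod_cast hcnt x
    have hperm : (w.map (fun x => x - d)).Perm Bs :=
      hsub.perm_of_length_le (by simp [hlB, hw])
    have hmapeq : ws.map (fun x => x - d) = Bs := by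
      have hp2 : (ws.map (fun x => x - d)).Perm Bs := ((hwperm.map _).trans hperm)
      have hsorted : (ws.map (fun x => x - d)).Pairwise (· ≤ ·) := by
        exact List.Pairwise.map _ (fun a b hab => by omega) hwsort
      have := PySem.List.sorted_id_eq_of_perm_of_pairwise Bs (ws.map (fun x => x - d))
        hp2 hsorted
      rw [hBs, PySem.List.sorted_sorted] at this
      rw [← hBs] at this
      exact this.symm
    refine ⟨d, ?_, ?_⟩
    · intro h
      have : M = 0 := by
        have := congrArg List.length h
        simpa using this
      omega
    · intro y hy
      rw [List.mem_map] at hy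
      obtain ⟨k, hk, hky⟩ := hy
      rw [List.mem_range] at hk
      have hklw : k < ws.length := by omega
      have hklB : k < Bs.length := by omega
      rw [List.getD_eq_getElem ws 0 hklw, List.getD_eq_getElem Bs 0 hklB] at hky
      have hBk : ws[k]'hklw - d = Bs[k]'hklB := by
        have h1 := List.getElem_of_eq hmapeq (by simpa using hklw : k < (ws.map (fun x => x - d)).length)
        simpa using h1
      omega

-- ===== VERDICT (by name: the statement is the Claim_ definition above) =====
theorem check_beautiful_sequences_spec : Claim_equal_check_beautiful_sequences := by
  intro A B _
  unfold Spec_check_beautiful_sequences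
  unfold check_beautiful_sequences check_beautiful_sequences_alt
  simp only [pvBSort_eq_sorted, PySem.List.len_eq, PySem.List.length_sorted]
  by_cases hB : B = []
  · subst hB
    rw [if_pos (by norm_num)]
    rw [PySem.List.foldl_congr_mem _ _ (fun st _ => st) _ (by
      intro st i _
      rw [PySem.List.pyRange_one_eq_nil (by norm_num)]
      norm_num [PySem.Set.ofList, PySem.Set.len])]
    exact PySem.List.foldl_ignore _ _
  · rw [if_neg (by
      intro h
      exact hB (List.eq_nil_of_length_eq_zero (by exact_mod_cast h)))]
    apply PySem.List.foldl_congr_mem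
    intro st i hi
    rw [PySem.List.mem_pyRange_one] at hi
    obtain ⟨hi0, hiN⟩ := hi
    set window := PySem.List.slice A (some i) (some (i + (B.length : Int))) with hwin
    have hwlen : window.length = B.length := by
      rw [hwin, PySem.List.slice_toNat A hi0 (by positivity)]
      have h1 : (i + (B.length : Int)).toNat = i.toNat + B.length := by omega
      have h2 : i.toNat + B.length ≤ A.length := by omega
      simp [h1]
      omega
    have hcond := pvCond_iff window B hwlen hB
    rw [PySem.List.len_eq] at hcond
    rw [PySem.Dict.foldl_insert_getD_add_one_eq_counter]
    by_cases h : PySem.Set.len (PySem.Set.ofList ((PySem.List.pyRange 0 (B.length : Int) 1).map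
        (fun j => PySem.List.pyGetD (PySem.List.sorted window (fun x => x) false) j 0
                - PySem.List.pyGetD (PySem.List.sorted B (fun x => x) false) j 0))) = 1
    · rw [if_pos h, if_pos (hcond.mp h)]
    · rw [if_neg h, if_neg (fun hc => h (hcond.mpr hc))]
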